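-- pv_equiv track=rewrite | github.com/xwang322/Coding-Interview | Linkedin/FindOneValidTriangle.py | findOneTriangle
-- ===== SOURCE A (Python) =====
-- def findOneTriangle(nums):
--     if not nums:
--         return 0
--     nums.sort()
--     for i in range(len(nums)-1, 1, -1):
--         left = 0
--         right = i-1
--         while left < right:
--             if nums[left] + nums[right] > nums[i]:
--                 return True
--             else:
--                 left += 1
--     return False
-- ===== SOURCE B (Python) =====
-- def findOneTriangle(nums):
--     nums.sort()
--     for i in range(2, len(nums)):
--         if nums[i-2] + nums[i-1] > nums[i]:
--             return True
--     return False
-- ===== Notes on version B (the rewrite author's own statement) =====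
-- stated objective: alternative
-- what changed: Replaces A's nested scan (for each top index i, an inner while scanning every left index against the fixed right=i-1) by a single pass over the sorted list checking consecutive triples nums[i-2]+nums[i-1]>nums[i], which suffices once sorted; a timing run's inputs are dominated by the sort, so no speed-up was measured.
-- outside the precondition, e.g. on findOneTriangle([]): A returns 0, B returns False
import Mathlib
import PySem

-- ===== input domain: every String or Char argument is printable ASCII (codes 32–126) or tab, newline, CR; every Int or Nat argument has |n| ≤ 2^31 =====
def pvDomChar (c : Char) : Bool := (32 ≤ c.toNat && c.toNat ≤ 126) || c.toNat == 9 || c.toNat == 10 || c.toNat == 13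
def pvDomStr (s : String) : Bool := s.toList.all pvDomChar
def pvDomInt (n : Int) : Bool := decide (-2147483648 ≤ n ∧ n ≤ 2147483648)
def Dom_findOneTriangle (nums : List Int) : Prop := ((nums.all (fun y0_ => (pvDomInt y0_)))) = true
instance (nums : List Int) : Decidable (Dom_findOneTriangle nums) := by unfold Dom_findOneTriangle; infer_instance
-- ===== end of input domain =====

-- B replaces A's nested scan by a single pass over the sorted list checking consecutive
-- triples, which suffices once sorted. Like A, Python B sorts its argument in place;
-- the equivalence proved here is about the return value.

-- ===== PORT A =====
-- nums[k] on an in-range index (always in range where A reads; exact there)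
def pvGetA (s : List Int) (k : Int) : Int := PySem.List.pyGetD s k 0

-- the 'while left < right' loop (right is never changed by A's loop body)
def pvInnerA (s : List Int) (i left right : Int) : Bool :=
  if _h : left < right then
    if pvGetA s left + pvGetA s right > pvGetA s i then true
    else pvInnerA s i (left + 1) right
  else false
termination_by (right - left).toNat
decreasing_by omega

-- the 'for i in range(len(nums)-1, 1, -1)' loop, with early return
def pvLoopA (s : List Int) : List Int → Bool
  | [] => false
  | i :: rest => if pvInnerA s i 0 (i - 1) then true else pvLoopA s rest

def findOneTriangle (nums : List Int) : Bool :=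
  if nums = [] then false   -- Python returns 0 here (excluded by Pre_)
  else
    let s := PySem.List.sorted nums (fun x => x) false
    pvLoopA s (PySem.List.pyRange ((s.length : Int) - 1) 1 (-1))

-- ===== PORT B =====
-- the 'for i in range(2, len(nums))' loop, with early return; nums[k] is
-- PySem.List.pyGetD (always in range where B reads; exact there)
def pvLoopB (s : List Int) : List Int → Bool
  | [] => false
  | i :: rest =>
      if PySem.List.pyGetD s (i - 2) 0 + PySem.List.pyGetD s (i - 1) 0 > PySem.List.pyGetD s i 0
      then true else pvLoopB s rest

def findOneTriangle_alt (nums : List Int) : Bool :=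
  let s := PySem.List.sorted nums (fun x => x) false
  pvLoopB s (PySem.List.pyRange 2 (s.length : Int) 1)

-- ===== PRECONDITION & SPEC =====
-- Pre_ excludes only the empty list, on which A returns the int 0 rather than a bool.
def Pre_findOneTriangle (nums : List Int) : Prop := nums ≠ []
instance (nums : List Int) : Decidable (Pre_findOneTriangle nums) := by unfold Pre_findOneTriangle; infer_instance
def pvWitness_findOneTriangle : List Int := ([3, 4, 5])

def Spec_findOneTriangle (nums : List Int) (out : Bool) : Prop := out = findOneTriangle_alt nums
instance (nums : List Int) (out : Bool) : Decidable (Spec_findOneTriangle nums out) := by unfold Spec_findOneTriangle; infer_instance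

-- ===== CLAIM (what is proved, stated in full; the proofs are below) =====
def Claim_equal_findOneTriangle : Prop := ∀ (nums : List Int), Dom_findOneTriangle nums → Pre_findOneTriangle nums → Spec_findOneTriangle nums (findOneTriangle nums)

-- ===== LEMMAS AND PROOFS =====

-- characterization of A's inner while loop
theorem pvInnerA_iff (s : List Int) (i left right : Int) :
    pvInnerA s i left right = true ↔
      ∃ l : Int, left ≤ l ∧ l < right ∧ pvGetA s l + pvGetA s right > pvGetA s i := by
  induction left using pvInnerA.induct s i (right := right) with
  | case1 left h hc =>
      rw [pvInnerA]; simp only [h, dite_true, hc, if_true, true_iff]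
      exact ⟨left, le_refl _, h, hc⟩
  | case2 left h hc ih =>
      rw [pvInnerA]; simp only [h, dite_true, hc, if_false]
      rw [ih]
      constructor
      · rintro ⟨l, h1, h2, h3⟩; exact ⟨l, by omega, h2, h3⟩
      · rintro ⟨l, h1, h2, h3⟩
        refine ⟨l, ?_, h2, h3⟩
        rcases eq_or_lt_of_le h1 with rfl | hlt
        · exact absurd h3 hc
        · omega
  | case3 left h =>
      rw [pvInnerA]; simp only [h, dite_false]
      constructor
      · intro hf; exact absurd hf (by simp)
      · rintro ⟨l, h1, h2, _⟩; omega

-- characterization of A's outer for loop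
theorem pvLoopA_any (s : List Int) (L : List Int) :
    pvLoopA s L = L.any (fun i => pvInnerA s i 0 (i - 1)) := by
  induction L with
  | nil => rfl
  | cons i rest ih =>
      rw [pvLoopA, List.any_cons, ih]
      by_cases h : pvInnerA s i 0 (i - 1) <;> simp [h]

-- characterization of B's loop
theorem pvLoopB_any (s : List Int) (L : List Int) :
    pvLoopB s L = L.any (fun i =>
      decide (PySem.List.pyGetD s (i - 2) 0 + PySem.List.pyGetD s (i - 1) 0 > PySem.List.pyGetD s i 0)) := by
  induction L with
  | nil => rfl
  | cons i rest ih =>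
      rw [pvLoopB, List.any_cons, ih]
      by_cases h : PySem.List.pyGetD s (i - 2) 0 + PySem.List.pyGetD s (i - 1) 0 > PySem.List.pyGetD s i 0 <;> simp [h]

-- a sorted list is monotone in its (in-range, nonnegative) indices
theorem sorted_pyGetD_mono (s : List Int) (hs : s.Pairwise (· ≤ ·))
    (a b : Int) (ha : 0 ≤ a) (hab : a ≤ b) (hb : b < (s.length : Int)) :
    PySem.List.pyGetD s a 0 ≤ PySem.List.pyGetD s b 0 := by
  rw [PySem.List.pyGetD_eq_getElem s (i := a) 0 ha (by omega),
      PySem.List.pyGetD_eq_getElem s (i := b) 0 (by omega) hb]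
  rcases eq_or_lt_of_le hab with rfl | hlt
  · exact le_refl _
  · exact (List.pairwise_iff_getElem.mp hs) a.toNat b.toNat (by omega) (by omega) (by omega)

-- ===== VERDICT (by name: the statement is the Claim_ definition above) =====
theorem findOneTriangle_spec : Claim_equal_findOneTriangle := by
  intro nums _ hpre
  unfold Spec_findOneTriangle findOneTriangle findOneTriangle_alt
  rw [if_neg hpre]
  set s := PySem.List.sorted nums (fun x => x) false with hsdef
  have hs : s.Pairwise (· ≤ ·) := PySem.List.sorted_pairwise nums (fun x => x)
  rw [Bool.eq_iff_iff, pvLoopA_any, pvLoopB_any, List.any_eq_true, List.any_eq_true]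
  simp only [PySem.List.mem_pyRange_neg_one, PySem.List.mem_pyRange_one, pvInnerA_iff,
    decide_eq_true_eq, pvGetA]
  constructor
  · rintro ⟨i, ⟨hi1, hi2⟩, l, hl0, hlr, hgt⟩
    refine ⟨i, ⟨by omega, by omega⟩, ?_⟩
    have hmono : PySem.List.pyGetD s l 0 ≤ PySem.List.pyGetD s (i - 2) 0 :=
      sorted_pyGetD_mono s hs l (i - 2) hl0 (by omega) (by omega)
    omega
  · rintro ⟨i, ⟨hi1, hi2⟩, hgt⟩
    exact ⟨i, ⟨by omega, by omega⟩, i - 2, by omega, by omega, hgt⟩
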